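-- pv_equiv track=rewrite | github.com/ArvoreDosSaberes/Capacitacao_GemeosDigitais | scripts/process_vtt.py | _extract_json_string
-- ===== SOURCE A (Python) =====
-- def _extract_json_string(text, index):
--     if index >= len(text) or text[index] != '"':
--         return None, index
--     escaped = False
--     for pos in range(index + 1, len(text)):
--         char = text[pos]
--         if escaped:
--             escaped = False
--             continue
--         if char == "\\":
--             escaped = True
--             continue
--         if char == '"':
--             return text[index : pos + 1], pos + 1
--     return None, index
-- ===== SOURCE B (Python) =====
-- def _extract_json_string(text, index):
--     if not (0 <= index < len(text)) or text[index] != '"':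
--         return None, index
--     pos = text.find('"', index + 1)
--     while pos != -1:
--         b = pos - 1
--         while b > index and text[b] == '\\':
--             b -= 1
--         if (pos - 1 - b) % 2 == 0:
--             return text[index:pos + 1], pos + 1
--         pos = text.find('"', pos + 1)
--     return None, index
-- ===== Notes on version B (the rewrite author's own statement) =====
-- stated objective: alternative
-- what changed: A walks every character forward carrying an 'escaped' boolean; B instead jumps between candidate closing quotes with str.find and, for each, counts the run of backslashes immediately before it backwards, accepting the quote iff that run has even length.
-- outside the precondition, e.g. on _extract_json_string('"a"', -3): A returns ('', 0), B returns (None, -3); on _extract_json_string('abc', -5): A raises IndexError, B returns (None, -5)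
import Mathlib
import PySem

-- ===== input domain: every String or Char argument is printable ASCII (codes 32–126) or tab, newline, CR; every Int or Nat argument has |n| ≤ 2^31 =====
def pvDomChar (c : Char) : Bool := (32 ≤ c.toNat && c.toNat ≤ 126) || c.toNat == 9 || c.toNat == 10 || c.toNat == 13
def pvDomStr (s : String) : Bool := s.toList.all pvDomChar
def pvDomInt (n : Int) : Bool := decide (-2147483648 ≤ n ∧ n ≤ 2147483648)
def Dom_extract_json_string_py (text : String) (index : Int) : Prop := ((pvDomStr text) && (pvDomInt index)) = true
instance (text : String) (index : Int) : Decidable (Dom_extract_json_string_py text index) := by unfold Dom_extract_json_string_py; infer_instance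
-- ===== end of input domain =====

-- B replaces A's forward escaped-flag state machine by repeated str.find of the next quote
-- plus a backward count of the backslashes before it (parity decides whether it closes);
-- objective: alternative algorithm, same cost; return value only, no mutation.

-- ===== PORT A =====
-- the 'for pos in range(index+1, len(text))' loop with the 'escaped' flag; early return on an unescaped '"'
def extractLoopA (text : String) (index : Int) : List Int → Bool → Option String × Int
  | [], _ => (none, index)
  | pos :: rest, escaped =>
    match PySem.Str.pyGet? text pos with
    | none => (none, index)      -- IndexError: unreachable, pos is in range
    | some char =>
      if escaped then extractLoopA text index rest false
      else if char = '\\' then extractLoopA text index rest true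
      else if char = '"' then (some (PySem.Str.slice text (some index) (some (pos + 1))), pos + 1)
      else extractLoopA text index rest escaped

def extract_json_string_py (text : String) (index : Int) : Option String × Int :=
  if PySem.Str.len text ≤ index then (none, index)
  else
    match PySem.Str.pyGet? text index with
    | none => (none, index)      -- IndexError (index < -len(text)); excluded by Pre_
    | some c =>
      if c ≠ '"' then (none, index)
      else extractLoopA text index (PySem.List.pyRange (index + 1) (PySem.Str.len text) 1) false

-- ===== PORT B =====
-- Source B's inner 'while b > index and text[b] == "\\"' backslash counter; fuel = b - index,
-- enough since b decreases towards index each iteration (fuel only makes the while total)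
def backB (text : String) (index : Int) : Nat → Int → Int
  | 0, b => b
  | fuel + 1, b =>
    if index < b then
      if PySem.Str.pyGet? text b = some '\\' then backB text index fuel (b - 1) else b
    else b

-- Source B's outer 'while pos != -1' loop over text.find('"', …) candidates; fuel = number of
-- remaining candidates (pos grows by ≥ 1 per iteration, so len(text) - index iterations suffice)
def scanQuotes (text : String) (index : Int) : Nat → Int → Option String × Int
  | 0, _ => (none, index)
  | fuel + 1, pos =>
    if pos = -1 then (none, index)
    else
      let b := backB text index (pos - 1 - index).toNat (pos - 1)
      if PySem.Int.mod (pos - 1 - b) 2 = 0 then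
        (some (PySem.Str.slice text (some index) (some (pos + 1))), pos + 1)
      else scanQuotes text index fuel (PySem.Str.findFrom text "\"" (pos + 1) none)

def extract_json_string_py_alt (text : String) (index : Int) : Option String × Int :=
  if 0 ≤ index ∧ index < PySem.Str.len text then
    match PySem.Str.pyGet? text index with
    | some '"' =>
        scanQuotes text index (PySem.Str.len text - index).toNat
          (PySem.Str.findFrom text "\"" (index + 1) none)
    | _ => (none, index)
  else (none, index)

-- ===== PRECONDITION & SPEC =====
-- Pre_ excludes index < -len(text), where A raises IndexError on text[index], and negative
-- in-range indices whose wrapped-around character is a double quote: there Python's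
-- negative-index wraparound makes A scan from a wrapped position and return an accidental
-- value, a corner no caller of this offset-based scanner would specify; B treats any
-- negative index as out of bounds.
def Pre_extract_json_string_py (text : String) (index : Int) : Prop :=
  0 ≤ index ∨ PySem.Str.len text ≤ index ∨
    (-(PySem.Str.len text) ≤ index ∧ PySem.Str.pyGet? text index ≠ some '"')
instance (text : String) (index : Int) : Decidable (Pre_extract_json_string_py text index) := by unfold Pre_extract_json_string_py; infer_instance
def pvWitness_extract_json_string_py : String × Int := ("\"ab\"", 0)

def Spec_extract_json_string_py (text : String) (index : Int) (out : Option String × Int) : Prop := out = extract_json_string_py_alt text index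
instance (text : String) (index : Int) (out : Option String × Int) : Decidable (Spec_extract_json_string_py text index out) := by unfold Spec_extract_json_string_py; infer_instance

-- ===== CLAIM (what is proved, stated in full; the proofs are below) =====
def Claim_equal_extract_json_string_py : Prop := ∀ (text : String) (index : Int), Dom_extract_json_string_py text index → Pre_extract_json_string_py text index → Spec_extract_json_string_py text index (extract_json_string_py text index)

-- ===== LEMMAS AND PROOFS =====

theorem str_get_some (text : String) (q : Int) (h0 : 0 ≤ q) (hq : q < PySem.Str.len text) :
    ∃ c, PySem.Str.pyGet? text q = some c := by
  rw [PySem.Str.len_eq] at hq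
  refine ⟨text.toList[q.toNat]'(by omega), ?_⟩
  rw [PySem.Str.pyGet?_eq, PySem.Chars.pyGet?_eq_listPyGet?]
  exact PySem.List.pyGet?_eq_some_getElem _ (by omega) (by omega)

theorem getc_eq_getElem? (text : String) (j : Int) (h0 : 0 ≤ j) :
    PySem.Str.pyGet? text j = text.toList[j.toNat]? := by
  rw [PySem.Str.pyGet?_eq, PySem.Chars.pyGet?_eq_listPyGet?, PySem.List.pyGet?_of_nonneg _ h0]

theorem lenStr (text : String) : ((text.length : Int)) = PySem.Str.len text := by
  rw [PySem.Str.len_eq]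
  norm_num

theorem quote_prefix_iff (l : List Char) (i : Nat) :
    (['"'] <+: l.drop i) ↔ l[i]? = some '"' := by
  rw [← List.head?_drop]
  cases h : l.drop i with
  | nil => simp
  | cons y ys =>
    constructor
    · rintro ⟨t, ht⟩
      simp only [List.singleton_append] at ht
      rw [← ht]; rfl
    · intro hh
      refine ⟨ys, ?_⟩
      simp only [List.head?_cons, Option.some.injEq] at hh
      simp [hh]

-- one escaped=True step of A's loop just consumes the character at q
theorem loopA_true (text : String) (index q b : Int) (h0 : 0 ≤ q)
    (hb : b ≤ PySem.Str.len text) :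
    extractLoopA text index (PySem.List.pyRange q b 1) true
      = extractLoopA text index (PySem.List.pyRange (q + 1) b 1) false := by
  by_cases hqb : b ≤ q
  · rw [PySem.List.pyRange_one_eq_nil hqb, PySem.List.pyRange_one_eq_nil (by omega)]
    rfl
  · push_neg at hqb
    obtain ⟨c, hc⟩ := str_get_some text q h0 (by omega)
    rw [PySem.Str.pyGet?_eq, PySem.Chars.pyGet?_eq_listPyGet?] at hc
    rw [PySem.List.pyRange_one_cons hqb]
    simp [extractLoopA, hc]

-- a stretch with no double quote never returns: A's loop falls through to (none, index)
theorem loopA_no_quote (text : String) (index : Int) (h0 : 0 ≤ index) :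
    ∀ (m : Nat) (p : Int) (s : Bool), index + 1 ≤ p →
    (PySem.Str.len text - p).toNat = m →
    (∀ j, p ≤ j → j < PySem.Str.len text → PySem.Str.pyGet? text j ≠ some '"') →
    extractLoopA text index (PySem.List.pyRange p (PySem.Str.len text) 1) s = (none, index) := by
  intro m
  induction m using Nat.strong_induction_on with
  | _ m ih =>
    intro p s hp hm hnq
    by_cases hpL : PySem.Str.len text ≤ p
    · rw [PySem.List.pyRange_one_eq_nil hpL]; rfl
    · push_neg at hpL
      obtain ⟨c, hc⟩ := str_get_some text p (by omega) hpL
      have hcq : c ≠ '"' := fun h => hnq p le_rfl hpL (h ▸ hc)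
      rw [PySem.List.pyRange_one_cons hpL]
      have hnext : ∀ s', extractLoopA text index
          (PySem.List.pyRange (p + 1) (PySem.Str.len text) 1) s' = (none, index) := fun s' =>
        ih (PySem.Str.len text - (p + 1)).toNat (by omega) (p + 1) s' (by omega) rfl
          (fun j hj hjL => hnq j (by omega) hjL)
      cases s with
      | true =>
        simp only [extractLoopA]
        rw [hc]
        norm_num
        exact hnext false
      | false =>
        by_cases hb : c = '\\'
        · simp only [extractLoopA]
          rw [hc]
          simp only [hb]
          norm_num
          exact hnext true
        · simp only [extractLoopA]
          rw [hc]
          simp only [hb, hcq]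
          norm_num
          exact hnext false

-- the result of Source B's inner backslash-count loop: it stops at index or at the first
-- non-backslash, and everything strictly above it (up to start) is a backslash
theorem backB_spec (text : String) (index : Int) (h0 : 0 ≤ index) :
    ∀ (fuel : Nat) (start : Int), index ≤ start → start < PySem.Str.len text →
    (start - index).toNat ≤ fuel →
    index ≤ backB text index fuel start ∧ backB text index fuel start ≤ start ∧
    (backB text index fuel start = index ∨
      PySem.Str.pyGet? text (backB text index fuel start) ≠ some '\\') ∧
    (∀ j, backB text index fuel start < j → j ≤ start → PySem.Str.pyGet? text j = some '\\') := by
  intro fuel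
  induction fuel with
  | zero =>
    intro start hs hsL hf
    have : start = index := by omega
    subst this
    refine ⟨le_rfl, le_rfl, Or.inl ?_, fun j h1 h2 => absurd (lt_of_lt_of_le h1 h2) (lt_irrefl _)⟩
    rfl
  | succ f ihf =>
    intro start hs hsL hf
    by_cases hlt : index < start
    · by_cases hbs : PySem.Str.pyGet? text start = some '\\'
      · have hrec := ihf (start - 1) (by omega) (by omega) (by omega)
        simp only [backB, if_pos hlt, if_pos hbs]
        refine ⟨hrec.1, by omega, hrec.2.2.1, fun j h1 h2 => ?_⟩
        by_cases hj : j ≤ start - 1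
        · exact hrec.2.2.2 j h1 hj
        · have : j = start := by omega
          exact this ▸ hbs
      · simp only [backB, if_pos hlt, if_neg hbs]
        exact ⟨hs, le_rfl, Or.inr hbs, fun j h1 h2 => absurd (lt_of_lt_of_le h1 h2) (lt_irrefl _)⟩
    · have : start = index := by omega
      subst this
      simp only [backB, if_neg hlt]
      refine ⟨le_rfl, le_rfl, ?_, fun j h1 h2 => absurd (lt_of_lt_of_le h1 h2) (lt_irrefl _)⟩
      exact Or.inl (by trivial)

-- skipping a quote-free stretch [p, q): A's flag at q is the parity of the backslash run
-- just before q (clipped to the stretch)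
theorem skip_seg (text : String) (index b : Int) (h0 : 0 ≤ index) :
    ∀ (m : Nat) (p q : Int), index + 1 ≤ p → p ≤ q → q ≤ PySem.Str.len text →
    (q - p).toNat = m →
    (∀ j, p ≤ j → j < q → PySem.Str.pyGet? text j ≠ some '"') →
    index ≤ b → b ≤ q - 1 →
    (b = index ∨ PySem.Str.pyGet? text b ≠ some '\\') →
    (∀ j, b < j → j ≤ q - 1 → PySem.Str.pyGet? text j = some '\\') →
    extractLoopA text index (PySem.List.pyRange p (PySem.Str.len text) 1) false
      = extractLoopA text index (PySem.List.pyRange q (PySem.Str.len text) 1)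
          (decide ((q - 1 - max b (p - 1)) % 2 = 1)) := by
  intro m
  induction m using Nat.strong_induction_on with
  | _ m ih =>
    intro p q hp hpq hqL hm hnq hbi hbq hstop hrun
    by_cases hpq' : p = q
    · subst hpq'
      have h00 : (p - 1 - max b (p - 1)) % 2 = 0 := by
        rw [max_eq_right (by omega : b ≤ p - 1)]
        omega
      rw [h00]
      rfl
    · have hplt : p < q := by omega
      obtain ⟨c, hc⟩ := str_get_some text p (by omega) (by omega)
      have hcq : c ≠ '"' := fun h => hnq p le_rfl hplt (h ▸ hc)
      by_cases hbs : c = '\\'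
      · -- a backslash at p: the run may reach down to p, so b ≤ p - 1 or b ≥ p + 1
        have hble : b ≤ p - 1 ∨ p + 1 ≤ b := by
          by_cases h : b < p
          · left; omega
          · right
            by_cases h' : b = p
            · exfalso
              rcases hstop with h'' | h''
              · omega
              · apply h''
                rw [h', hc, hbs]
            · omega
        rw [PySem.List.pyRange_one_cons (by omega : p < PySem.Str.len text)]
        simp only [extractLoopA]
        rw [hc]
        simp only [hbs]
        norm_num
        rw [lenStr text]
        rw [loopA_true text index (p + 1) _ (by omega) le_rfl]
        by_cases hq1 : p + 1 = q
        · -- the stretch ends right after the backslash: A arrives at q escaped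
          have hb' : b ≤ p - 1 := by
            rcases hble with h | h
            · exact h
            · omega
          have hmax : max b (p - 1) = p - 1 := max_eq_right (by omega)
          have h11 : (q - 1 - max b (p - 1)) % 2 = 1 := by rw [hmax]; omega
          rw [h11, show (decide ((1:Int) = 1)) = true from rfl,
            show p + 1 + 1 = q + 1 by omega,
            ← loopA_true text index q _ (by omega) le_rfl]
        · have hq2 : p + 2 ≤ q := by omega
          rw [show p + 1 + 1 = p + 2 by omega]
          have := ih (q - (p + 2)).toNat (by omega) (p + 2) q (by omega) hq2 hqL rfl
            (fun j hj hjq => hnq j (by omega) hjq) hbi hbq hstop hrun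
          rw [this]
          congr 2
          rw [show p + 2 - 1 = p + 1 by omega]
          rcases hble with h | h
          · rw [max_eq_right (by omega : b ≤ p + 1), max_eq_right (by omega : b ≤ p - 1)]
            have heq2 : (q - 1 - (p + 1)) % 2 = (q - 1 - (p - 1)) % 2 := by omega
            rw [heq2]
          · rw [max_eq_left (by omega : p + 1 ≤ b), max_eq_left (by omega : p - 1 ≤ b)]
      · -- an ordinary character at p: the run cannot reach p, so b ≥ p
        have hbp : p ≤ b := by
          by_contra h
          push_neg at h
          exact hbs (Option.some.inj ((hrun p (by omega) (by omega)).symm.trans hc).symm)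
        rw [PySem.List.pyRange_one_cons (by omega : p < PySem.Str.len text)]
        simp only [extractLoopA]
        rw [hc]
        simp only [hbs, hcq]
        norm_num
        rw [lenStr text]
        have := ih (q - (p + 1)).toNat (by omega) (p + 1) q (by omega) (by omega) hqL rfl
          (fun j hj hjq => hnq j (by omega) hjq) hbi hbq hstop hrun
        rw [this]
        congr 2
        rw [show p + 1 - 1 = p by omega]
        rw [max_eq_left (by omega : p ≤ b), max_eq_left (by omega : p - 1 ≤ b)]

-- the core correspondence: A's flag loop from a boundary position p (p = index+1 or just
-- past a consumed quote) equals Source B's find-next-quote / count-backslashes loop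
theorem main_loop (text : String) (index : Int) (h0 : 0 ≤ index) :
    ∀ (m : Nat) (p : Int) (fuel : Nat), index + 1 ≤ p → p ≤ PySem.Str.len text →
    (PySem.Str.len text - p).toNat = m → m < fuel →
    (p = index + 1 ∨ PySem.Str.pyGet? text (p - 1) = some '"') →
    extractLoopA text index (PySem.List.pyRange p (PySem.Str.len text) 1) false
      = scanQuotes text index fuel (PySem.Str.findFrom text "\"" p none) := by
  intro m
  induction m using Nat.strong_induction_on with
  | _ m ih =>
    intro p fuel hp hpL hm hfuel hbdry
    obtain ⟨f, rfl⟩ : ∃ f, fuel = f + 1 := ⟨fuel - 1, by omega⟩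
    have hLlen : PySem.Str.len text = (text.toList.length : Int) := PySem.Str.len_eq text
    have hkn : p = ((p.toNat : Nat) : Int) := by omega
    have hklen : p.toNat ≤ text.toList.length := by omega
    have hff : PySem.Str.findFrom text "\"" p none
        = PySem.Chars.findFrom text.toList ['"'] ((p.toNat : Nat) : Int) none := by
      rw [PySem.Str.findFrom_eq, ← hkn]; rfl
    by_cases hneg : PySem.Str.findFrom text "\"" p none = -1
    · -- no further quote: A falls through, B's find returns -1
      rw [hneg]
      have hnoq : ¬ ['"'] <:+: text.toList.drop p.toNat := by
        rw [hff] at hneg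
        exact (PySem.Chars.findFrom_natCast_eq_neg_one_iff text.toList ['"'] p.toNat hklen).mp
          hneg
      have hnq : ∀ j, p ≤ j → j < PySem.Str.len text → PySem.Str.pyGet? text j ≠ some '"' := by
        intro j hj hjL hget
        apply hnoq
        rw [List.singleton_infix_iff]
        rw [getc_eq_getElem? text j (by omega)] at hget
        have hjlen : j.toNat < text.toList.length := by omega
        have : text.toList[j.toNat] = '"' := by
          have := List.getElem?_eq_getElem hjlen
          rw [this] at hget
          exact Option.some.inj hget
        have hmem : '"' ∈ text.toList.drop p.toNat := by
          rw [← this]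
          have : text.toList[j.toNat] = (text.toList.drop p.toNat)[j.toNat - p.toNat]'(by
            rw [List.length_drop]; omega) := by
            rw [List.getElem_drop]
            congr 1
            omega
          rw [this]
          exact List.getElem_mem _
        exact hmem
      rw [loopA_no_quote text index h0 m p false hp hm hnq]
      simp [scanQuotes]
    · -- a candidate quote at q
      set q := PySem.Str.findFrom text "\"" p none with hqdef
      rw [hff] at hneg
      obtain ⟨hq1, hq2, hq3⟩ := PySem.Chars.findFrom_natCast_spec text.toList ['"'] p.toNat
        hklen hneg
      rw [← hff] at hq1 hq2 hq3
      have hpq : p ≤ q := by omega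
      have hget_q : PySem.Str.pyGet? text q = some '"' := by
        rw [getc_eq_getElem? text q (by omega)]
        exact (quote_prefix_iff _ _).mp hq2
      have hq2' : text.toList[q.toNat]? = some '"' := by
        rw [← getc_eq_getElem? text q (by omega)]
        exact hget_q
      have hqL : q < PySem.Str.len text := by
        have h2 : q.toNat < text.toList.length := by
          by_contra hcon
          rw [List.getElem?_eq_none (by omega)] at hq2'
          simp at hq2'
        omega
      have hnq : ∀ j, p ≤ j → j < q → PySem.Str.pyGet? text j ≠ some '"' := by
        intro j hj hjq hget
        apply hq3 j.toNat (by omega) (by omega)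
        rw [quote_prefix_iff]
        rw [getc_eq_getElem? text j (by omega)] at hget
        exact hget
      -- the inner backslash count of Source B
      have hb := backB_spec text index h0 (q - 1 - index).toNat (q - 1) (by omega) (by omega)
        (by omega)
      set b := backB text index (q - 1 - index).toNat (q - 1) with hbdef
      have hbp : p - 1 ≤ b := by
        by_contra h
        push_neg at h
        have hrun := hb.2.2.2 (p - 1) (by omega) (by omega)
        rcases hbdry with h' | h'
        · omega
        · rw [h'] at hrun
          exact absurd (Option.some.inj hrun) (by decide)
      have hseg := skip_seg text index b h0 (q - p).toNat p q hp hpq (by omega) rfl hnq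
        hb.1 (by omega) hb.2.2.1 hb.2.2.2
      rw [max_eq_left hbp] at hseg
      have hmod2 : (q - 1 - b) % 2 = 0 ∨ (q - 1 - b) % 2 = 1 := by omega
      have hq_ne : ¬ q = -1 := by omega
      rcases hmod2 with hpar | hpar
      · -- even run: the quote closes; both sides return the slice
        have hdec : decide ((q - 1 - b) % 2 = 1) = false := by rw [hpar]; rfl
        rw [hseg, hdec]
        rw [PySem.List.pyRange_one_cons hqL]
        simp only [extractLoopA]
        rw [hget_q]
        norm_num
        simp only [scanQuotes, if_neg hq_ne, ← hbdef,
          PySem.Int.mod_eq_emod_of_pos (by norm_num : (0:Int) < 2), hpar]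
        rw [if_neg (show ¬('"':Char) = '\\' by decide), if_pos trivial]
      · -- odd run: the quote is escaped; A consumes it, B finds the next candidate
        have hdec : decide ((q - 1 - b) % 2 = 1) = true := by rw [hpar]; rfl
        rw [hseg, hdec]
        rw [loopA_true text index q _ (by omega) le_rfl]
        have hq11 : q + 1 - 1 = q := by omega
        have hrec := ih (PySem.Str.len text - (q + 1)).toNat (by omega) (q + 1) f
          (by omega) (by omega) rfl (by omega) (Or.inr (by rw [hq11]; exact hget_q))
        rw [hrec]
        simp only [scanQuotes, if_neg hq_ne, ← hbdef,
          PySem.Int.mod_eq_emod_of_pos (by norm_num : (0:Int) < 2), hpar,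
          if_neg (show ¬((1:Int) = 0) by decide)]

-- ===== VERDICT (by name: the statement is the Claim_ definition above) =====
theorem extract_json_string_py_spec : Claim_equal_extract_json_string_py := by
  intro text index _ hpre
  unfold Pre_extract_json_string_py at hpre
  unfold Spec_extract_json_string_py
  unfold extract_json_string_py extract_json_string_py_alt
  set L := PySem.Str.len text with hLdef
  have hLnn : 0 ≤ L := by rw [hLdef, PySem.Str.len_eq]; exact Int.natCast_nonneg _
  by_cases hge : L ≤ index
  · rw [if_pos hge, if_neg (by omega)]
  · push_neg at hge
    by_cases h0 : 0 ≤ index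
    case neg =>
      -- negative in-range index whose wrapped character is not '"': both return (none, index)
      obtain ⟨hlo, hne⟩ : -L ≤ index ∧ PySem.Str.pyGet? text index ≠ some '"' := by
        rcases hpre with h | h | h
        · omega
        · omega
        · exact h
      have hin : PySem.Raise.InRange text.toList.length index := by
        rw [hLdef, PySem.Str.len_eq] at hlo hge
        constructor <;> omega
      obtain ⟨c, hcget⟩ : ∃ c, PySem.Str.pyGet? text index = some c := by
        rw [PySem.Str.pyGet?_eq, PySem.Chars.pyGet?_eq_listPyGet?]
        rcases h : PySem.List.pyGet? text.toList index with _ | c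
        · exact absurd hin ((PySem.List.pyGet?_eq_none_iff _ _).mp h)
        · exact ⟨c, rfl⟩
      have hcq : c ≠ '"' := fun h => hne (h ▸ hcget)
      rw [if_neg (by omega)]
      simp only [hcget]
      rw [if_pos hcq, if_neg (show ¬((0:Int) ≤ index ∧ index < L) by omega)]
    case pos =>
      obtain ⟨c, hcget⟩ := str_get_some text index h0 (by omega)
      rw [if_neg (by omega)]
      simp only [hcget]
      rw [if_pos (show (0:Int) ≤ index ∧ index < L from ⟨h0, hge⟩)]
      by_cases hcq : c = '"'
      · subst hcq
        rw [if_neg (by simp)]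
        exact main_loop text index h0 (L - (index + 1)).toNat (index + 1)
          (L - index).toNat (by omega) (by omega) rfl (by omega) (Or.inl rfl)
      · rw [if_pos hcq]
        split
        · next heq => exact absurd (Option.some.inj heq) hcq
        · rfl
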